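-- pv_equiv track=rewrite | github.com/CAMMA-public/Self-MVA | ssl/utils.py | merge_cross_view_associations_with_constraints
-- ===== SOURCE A (Python) =====
-- from collections import defaultdict
--
-- def merge_cross_view_associations_with_constraints(pairs):
--     """
--     Merges cross-view associations into multi-view associations, enforcing constraints
--     that each instance can only be associated with one instance per other view.
--
--     Args:
--         pairs (list of tuples): A list of tuples where each tuple contains two lists.
--                                 Each list represents the indices of instances that correspond
--                                 in two different images/views.
--
--     Returns:
--         list of sets: A list where each set represents a multi-view association.
--     """
--     # Graph representation with view tracking
--     graph = defaultdict(lambda: defaultdict(dict))  # graph[view][instance][other_view] = {instances}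
--
--     # Build the graph with constraints
--     for x, y in pairs:
--         if len(x) != len(y):
--             raise ValueError("Mismatched pair lengths in associations")
--
--         for a, b in zip(x, y):
--             view_a, instance_a = a
--             view_b, instance_b = b
--
--             # Ensure each instance is only connected to one per view
--             if view_b in graph[view_a][instance_a]:
--                 if graph[view_a][instance_a][view_b] != {instance_b}:
--                     continue  # Ignore noisy conflicts
--
--             if view_a in graph[view_b][instance_b]:
--                 if graph[view_b][instance_b][view_a] != {instance_a}:
--                     continue  # Ignore noisy conflicts
--
--             # Add the association
--             graph[view_a][instance_a].setdefault(view_b, set()).add(instance_b)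
--             graph[view_b][instance_b].setdefault(view_a, set()).add(instance_a)
--
--     # Convert graph to a multi-view association
--     def dfs(node, visited, component):
--         visited.add(node)
--         component.add(node)
--         view, instance = node
--
--         for neighbor_view, neighbors in graph[view][instance].items():
--             for neighbor in neighbors:
--                 neighbor_node = (neighbor_view, neighbor)
--                 if neighbor_node not in visited:
--                     dfs(neighbor_node, visited, component)
--
--     # Find all connected components
--     visited = set()
--     multi_view_associations = []
--
--     for view in graph:
--         for instance in graph[view]:
--             node = (view, instance)
--             if node not in visited:
--                 component = set()
--                 dfs(node, visited, component)
--                 multi_view_associations.append(component)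
--
--     return multi_view_associations
-- ===== SOURCE B (Python) =====
-- def merge_cross_view_associations_with_constraints(pairs):
--     """
--     Same result as the original, but with a flat node-keyed adjacency map of
--     scalar partners (exploiting that each slot can hold at most one instance
--     per other view, so the per-view sets are always singletons) and an
--     explicit-stack depth-first traversal instead of the recursive DFS.
--     """
--     adj = {}    # (view, instance) -> {other_view: other_instance}
--     views = {}  # view -> {instance: True}  (records the grouped first-touch order)
--
--     def touch(node):
--         if node not in adj:
--             adj[node] = {}
--             views.setdefault(node[0], {})[node[1]] = True
--
--     for x, y in pairs:
--         if len(x) != len(y):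
--             raise ValueError("Mismatched pair lengths in associations")
--         for a, b in zip(x, y):
--             a = tuple(a); b = tuple(b)
--             touch(a)
--             if b[0] in adj[a] and adj[a][b[0]] != b[1]:
--                 continue  # noisy conflict on a's side
--             touch(b)
--             if a[0] in adj[b] and adj[b][a[0]] != a[1]:
--                 continue  # noisy conflict on b's side
--             adj[a][b[0]] = b[1]
--             adj[b][a[0]] = a[1]
--
--     result = []
--     seen = set()
--     for view in views:
--         for instance in views[view]:
--             start = (view, instance)
--             if start in seen:
--                 continue
--             component = []
--             stack = [start]
--             while stack:
--                 node = stack.pop()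
--                 if node in seen:
--                     continue
--                 seen.add(node)
--                 component.append(node)
--                 # reversed so the stack visits neighbours in dict order
--                 stack.extend((w, j) for w, j in reversed(adj[node].items()))
--             result.append(set(component))
--     return result
-- ===== Notes on version B (the rewrite author's own statement) =====
-- stated objective: alternative
-- what changed: Replaces the three-level defaultdict-of-sets graph with a flat node-keyed adjacency dict of scalar partners (using the invariant that each per-view neighbour set is always a singleton) and replaces the recursive DFS with an explicit-stack iterative depth-first traversal.
import Mathlib
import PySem

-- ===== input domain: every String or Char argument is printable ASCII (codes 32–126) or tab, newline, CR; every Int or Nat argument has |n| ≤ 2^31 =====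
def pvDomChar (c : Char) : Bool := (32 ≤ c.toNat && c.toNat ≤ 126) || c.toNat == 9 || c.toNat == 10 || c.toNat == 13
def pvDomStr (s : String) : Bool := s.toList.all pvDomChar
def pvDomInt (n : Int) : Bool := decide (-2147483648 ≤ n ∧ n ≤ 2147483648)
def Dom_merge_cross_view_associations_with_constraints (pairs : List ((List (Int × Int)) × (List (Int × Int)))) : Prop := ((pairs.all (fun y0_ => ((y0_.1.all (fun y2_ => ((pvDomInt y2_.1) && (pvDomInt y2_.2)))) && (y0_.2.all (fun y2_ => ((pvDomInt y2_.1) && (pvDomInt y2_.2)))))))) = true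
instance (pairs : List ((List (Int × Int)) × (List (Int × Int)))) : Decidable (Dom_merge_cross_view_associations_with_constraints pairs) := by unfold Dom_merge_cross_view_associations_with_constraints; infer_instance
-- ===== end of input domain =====

-- B replaces A's three-level defaultdict-of-singleton-sets with a flat node-keyed adjacency dict of
-- scalar partners and replaces the recursive DFS with an explicit-stack traversal (objective: alternative).

-- ===== PORT A =====
-- graph[view][instance][other_view] = {instances}
def pvGraphA := PySem.Dict Int (PySem.Dict Int (PySem.Dict Int (PySem.Set Int)))

-- defaultdict access graph[v][i]: create empty entries if absent (keeps positions)
def pvTouchA (g : pvGraphA) (v i : Int) : pvGraphA :=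
  g.modify v PySem.Dict.empty (fun d => d.modify i PySem.Dict.empty id)

def pvNbhA (g : pvGraphA) (v i : Int) : PySem.Dict Int (PySem.Set Int) :=
  (g.getD v PySem.Dict.empty).getD i PySem.Dict.empty

-- graph[v][i].setdefault(w, set()).add(j)
def pvAddA (g : pvGraphA) (v i w j : Int) : pvGraphA :=
  g.modify v PySem.Dict.empty (fun d => d.modify i PySem.Dict.empty
    (fun dd => dd.insert w (PySem.Set.add (dd.getD w PySem.Set.empty) j)))

def pvStepA (g : pvGraphA) (a b : Int × Int) : pvGraphA :=
  let g := pvTouchA g a.1 a.2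
  if (pvNbhA g a.1 a.2).contains b.1 &&
     !(PySem.Set.equal ((pvNbhA g a.1 a.2).getD b.1 PySem.Set.empty) (PySem.Set.ofList [b.2])) then g
  else
    let g := pvTouchA g b.1 b.2
    if (pvNbhA g b.1 b.2).contains a.1 &&
       !(PySem.Set.equal ((pvNbhA g b.1 b.2).getD a.1 PySem.Set.empty) (PySem.Set.ofList [a.2])) then g
    else pvAddA (pvAddA g a.1 a.2 b.1 b.2) b.1 b.2 a.1 a.2

def pvBuildA (pairs : List ((List (Int × Int)) × (List (Int × Int)))) : pvGraphA :=
  pairs.foldl (fun g p => (p.1.zip p.2).foldl (fun g ab => pvStepA g ab.1 ab.2) g) PySem.Dict.empty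

def pvNodesA (g : pvGraphA) : List (Int × Int) :=
  g.items.flatMap (fun vd => vd.2.keys.map (fun i => (vd.1, i)))

-- recursive dfs; the fuel only makes the recursion structural and is never exhausted at the
-- call site below (recursion depth is bounded by the number of unvisited graph nodes)
def pvDfsA (g : pvGraphA) : Nat → (Int × Int) → PySem.Set (Int × Int) → PySem.Set (Int × Int) →
    PySem.Set (Int × Int) × PySem.Set (Int × Int)
  | 0, _, vis, comp => (vis, comp)
  | f+1, n, vis, comp =>
    let vis := PySem.Set.add vis n
    let comp := PySem.Set.add comp n
    (pvNbhA g n.1 n.2).items.foldl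
      (fun st p => p.2.foldl
        (fun (st : PySem.Set (Int × Int) × PySem.Set (Int × Int)) j =>
          if (p.1, j) ∈ st.1 then st else pvDfsA g f (p.1, j) st.1 st.2) st)
      (vis, comp)

def merge_cross_view_associations_with_constraints (pairs : List ((List (Int × Int)) × (List (Int × Int)))) : List (List (Int × Int)) :=
  let g := pvBuildA pairs
  let nodes := pvNodesA g
  (nodes.foldl
    (fun (st : PySem.Set (Int × Int) × List (List (Int × Int))) n =>
      if n ∈ st.1 then st
      else
        let r := pvDfsA g (nodes.length + 1) n st.1 PySem.Set.empty
        (r.1, st.2 ++ [r.2]))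
    (PySem.Set.empty, [])).2

-- ===== PORT B =====
def pvAdjB := PySem.Dict (Int × Int) (PySem.Dict Int Int)
def pvViewsB := PySem.Dict Int (PySem.Dict Int Bool)

def pvTouchB (st : pvAdjB × pvViewsB) (n : Int × Int) : pvAdjB × pvViewsB :=
  if st.1.contains n then st
  else (st.1.insert n PySem.Dict.empty,
        st.2.modify n.1 PySem.Dict.empty (fun d => d.insert n.2 true))

def pvStepB (st : pvAdjB × pvViewsB) (a b : Int × Int) : pvAdjB × pvViewsB :=
  let st := pvTouchB st a
  if (st.1.getD a PySem.Dict.empty).contains b.1 &&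
     !((st.1.getD a PySem.Dict.empty).getD b.1 0 == b.2) then st
  else
    let st := pvTouchB st b
    if (st.1.getD b PySem.Dict.empty).contains a.1 &&
       !((st.1.getD b PySem.Dict.empty).getD a.1 0 == a.2) then st
    else
      (((st.1.modify a PySem.Dict.empty (fun d => d.insert b.1 b.2)).modify b
          PySem.Dict.empty (fun d => d.insert a.1 a.2)), st.2)

def pvBuildB (pairs : List ((List (Int × Int)) × (List (Int × Int)))) : pvAdjB × pvViewsB :=
  pairs.foldl (fun st p => (p.1.zip p.2).foldl (fun st ab => pvStepB st ab.1 ab.2) st)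
    (PySem.Dict.empty, PySem.Dict.empty)

def pvNodesB (views : pvViewsB) : List (Int × Int) :=
  views.items.flatMap (fun vd => vd.2.keys.map (fun i => (vd.1, i)))

-- explicit-stack DFS; the stack top is the list head (Python pushes the neighbours reversed and
-- pops from the end, which processes them in dict order); fuel-guarded, never exhausted below
def pvLoopB (adj : pvAdjB) : Nat → List (Int × Int) → PySem.Set (Int × Int) → List (Int × Int) →
    PySem.Set (Int × Int) × List (Int × Int)
  | 0, _, seen, comp => (seen, comp)
  | _+1, [], seen, comp => (seen, comp)
  | f+1, n :: rest, seen, comp =>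
    if n ∈ seen then pvLoopB adj f rest seen comp
    else pvLoopB adj f ((adj.getD n PySem.Dict.empty).items ++ rest)
          (PySem.Set.add seen n) (comp ++ [n])

def pvFuelB (adj : pvAdjB) (nodes : List (Int × Int)) : Nat :=
  nodes.length + adj.items.foldl (fun acc p => acc + p.2.items.length) 0 + 2

def merge_cross_view_associations_with_constraints_alt (pairs : List ((List (Int × Int)) × (List (Int × Int)))) : List (List (Int × Int)) :=
  let st := pvBuildB pairs
  let nodes := pvNodesB st.2
  (nodes.foldl
    (fun (acc : PySem.Set (Int × Int) × List (List (Int × Int))) n =>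
      if n ∈ acc.1 then acc
      else
        let r := pvLoopB st.1 (pvFuelB st.1 nodes) [n] acc.1 []
        (r.1, acc.2 ++ [PySem.Set.ofList r.2]))
    (PySem.Set.empty, [])).2

-- ===== PRECONDITION & SPEC =====
-- Pre_ excludes exactly the inputs where the Python A raises ValueError (a pair with mismatched lengths)
def Pre_merge_cross_view_associations_with_constraints (pairs : List ((List (Int × Int)) × (List (Int × Int)))) : Prop :=
  ∀ p ∈ pairs, p.1.length = p.2.length
instance (pairs : List ((List (Int × Int)) × (List (Int × Int)))) : Decidable (Pre_merge_cross_view_associations_with_constraints pairs) := by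
  unfold Pre_merge_cross_view_associations_with_constraints; infer_instance

def pvWitness_merge_cross_view_associations_with_constraints : (List ((List (Int × Int)) × (List (Int × Int)))) :=
  [([(0, 0), (0, 1)], [(1, 0), (1, 1)]), ([(1, 0)], [(2, 5)])]

def Spec_merge_cross_view_associations_with_constraints (pairs : List ((List (Int × Int)) × (List (Int × Int)))) (out : List (List (Int × Int))) : Prop := out = merge_cross_view_associations_with_constraints_alt pairs
instance (pairs : List ((List (Int × Int)) × (List (Int × Int)))) (out : List (List (Int × Int))) : Decidable (Spec_merge_cross_view_associations_with_constraints pairs out) := by unfold Spec_merge_cross_view_associations_with_constraints; infer_instance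

-- ===== CLAIM (what is proved, stated in full; the proofs are below) =====
def Claim_equal_merge_cross_view_associations_with_constraints : Prop := ∀ (pairs : List ((List (Int × Int)) × (List (Int × Int)))), Dom_merge_cross_view_associations_with_constraints pairs → Pre_merge_cross_view_associations_with_constraints pairs → Spec_merge_cross_view_associations_with_constraints pairs (merge_cross_view_associations_with_constraints pairs)

-- ===== LEMMAS AND PROOFS =====

-- --- generic: two folds over the same list preserve a relation ---
theorem pvFoldRel {α β γ : Type} (R : α → β → Prop) (fA : α → γ → α) (fB : β → γ → β)
    (l : List γ) (hstep : ∀ x y c, R x y → R (fA x c) (fB y c)) :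
    ∀ x y, R x y → R (l.foldl fA x) (l.foldl fB y) := by
  induction l with
  | nil => intro x y h; exact h
  | cons c t ih => intro x y h; exact ih _ _ (hstep x y c h)

-- --- the singleton-set lift relating B's scalar adjacency dicts to A's dicts of sets ---
def pvLift (d : PySem.Dict Int Int) : PySem.Dict Int (PySem.Set Int) :=
  PySem.Dict.mk (d.items.map (fun p => (p.1, ([p.2] : PySem.Set Int))))

theorem pvLift_contains (d : PySem.Dict Int Int) (w : Int) :
    (pvLift d).contains w = d.contains w := by
  simp only [pvLift, PySem.Dict.contains, List.any_map]
  rfl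

theorem pvLift_get? (d : PySem.Dict Int Int) (w : Int) :
    (pvLift d).get? w = (d.get? w).map (fun j => ([j] : PySem.Set Int)) := by
  simp only [pvLift, PySem.Dict.get?, List.find?_map]
  rcases h : List.find? (fun p => p.1 == w) d.items with _ | p
  · rw [show ((fun p => p.1 == w) ∘ fun (p : Int × Int) => (p.1, ([p.2] : PySem.Set Int))) = (fun p => p.1 == w) from rfl, h]; rfl
  · rw [show ((fun p => p.1 == w) ∘ fun (p : Int × Int) => (p.1, ([p.2] : PySem.Set Int))) = (fun p => p.1 == w) from rfl, h]; rfl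

theorem pvLift_insert (d : PySem.Dict Int Int) (w j : Int) :
    (pvLift d).insert w ([j] : PySem.Set Int) = pvLift (d.insert w j) := by
  by_cases h : d.contains w = true
  · rw [PySem.Dict.insert, PySem.Dict.insert, if_pos (by rw [pvLift_contains]; exact h), if_pos h]
    simp [pvLift, List.map_map]
    rintro pa pb _
    by_cases hw : pa = w <;> simp [hw]
  · rw [PySem.Dict.insert, PySem.Dict.insert, if_neg (by rw [pvLift_contains]; exact h), if_neg h]
    simp [pvLift]

theorem pvLift_flat (d : PySem.Dict Int Int) :
    (pvLift d).items.flatMap (fun p => p.2.map (fun j => (p.1, j))) = d.items := by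
  simp [pvLift, List.flatMap_map]

theorem pvInsert_getD_self {κ ν : Type} [BEq κ] [LawfulBEq κ] (d : PySem.Dict κ ν) (k : κ) (dflt : ν)
    (hc : d.contains k = true) (hnd : d.keys.Nodup) : d.insert k (d.getD k dflt) = d := by
  rw [PySem.Dict.insert, if_pos hc]
  apply PySem.Dict.ext
  simp only
  conv_rhs => rw [← List.map_id d.items]
  apply List.map_congr_left
  intro p hp
  by_cases hw : p.1 == k
  · have hpk : p.1 = k := by simpa using hw
    have hval : d.getD k dflt = p.2 := by
      apply PySem.Dict.getD_of_mem_items (k := k) (v := p.2) (d := d) _ hnd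
      have : p = (k, p.2) := by cases p; simp_all
      rw [← this]; exact hp
    simp only [hw, if_pos]
    cases p; simp_all
  · simp [hw]

-- --- the build-phase invariant relating A's graph to B's (adj, views) ---
def pvInv (g : pvGraphA) (adj : pvAdjB) (views : pvViewsB) : Prop :=
  g.keys = views.keys ∧
  (∀ v, (g.getD v PySem.Dict.empty).keys = (views.getD v PySem.Dict.empty).keys) ∧
  (∀ v i, (pvNbhA g v i) = pvLift (adj.getD (v, i) PySem.Dict.empty)) ∧
  (∀ v i, adj.contains (v, i) = true ↔ (v ∈ g.keys ∧ i ∈ (g.getD v PySem.Dict.empty).keys)) ∧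
  (g.keys.Nodup ∧ (∀ v, (g.getD v PySem.Dict.empty).keys.Nodup) ∧ adj.keys.Nodup ∧
    views.keys.Nodup ∧ (∀ v, (views.getD v PySem.Dict.empty).keys.Nodup)) ∧
  (∀ n : Int × Int, ∀ p ∈ (adj.getD n PySem.Dict.empty).items, adj.contains (p.1, p.2) = true)

theorem pvContains_congr {κ ν ν' : Type} [BEq κ] [LawfulBEq κ] [DecidableEq κ]
    (d : PySem.Dict κ ν) (d' : PySem.Dict κ ν') (hk : d.keys = d'.keys) (k : κ) :
    d.contains k = d'.contains k := by
  rw [PySem.Dict.contains_eq_decide_mem_keys, PySem.Dict.contains_eq_decide_mem_keys, hk]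

theorem pvTouchA_of_mem {g : pvGraphA} {v i : Int}
    (hv : v ∈ g.keys) (hi : i ∈ (g.getD v PySem.Dict.empty).keys)
    (hnd1 : g.keys.Nodup) (hnd2 : (g.getD v PySem.Dict.empty).keys.Nodup) :
    pvTouchA g v i = g := by
  show g.insert v ((g.getD v PySem.Dict.empty).insert i
    ((g.getD v PySem.Dict.empty).getD i PySem.Dict.empty)) = g
  rw [pvInsert_getD_self _ _ _ ((PySem.Dict.contains_iff_mem_keys _ _).mpr hi) hnd2]
  exact pvInsert_getD_self _ _ _ ((PySem.Dict.contains_iff_mem_keys _ _).mpr hv) hnd1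

theorem pvTouchA_of_not_mem {g : pvGraphA} {v i : Int}
    (hni : i ∉ (g.getD v PySem.Dict.empty).keys) :
    pvTouchA g v i = g.insert v ((g.getD v PySem.Dict.empty).insert i PySem.Dict.empty) := by
  have hic : (g.getD v PySem.Dict.empty).contains i = false := by
    rcases hcc : (g.getD v PySem.Dict.empty).contains i with _ | _
    · rfl
    · exact absurd ((PySem.Dict.contains_iff_mem_keys _ _).mp hcc) hni
  show g.insert v ((g.getD v PySem.Dict.empty).insert i
    ((g.getD v PySem.Dict.empty).getD i PySem.Dict.empty)) = _
  rw [PySem.Dict.getD_of_not_contains (g.getD v PySem.Dict.empty) PySem.Dict.empty hic]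

theorem pvTouch_inv {g adj views} (h : pvInv g adj views) (n : Int × Int) :
    pvInv (pvTouchA g n.1 n.2) (pvTouchB (adj, views) n).1 (pvTouchB (adj, views) n).2 := by
  obtain ⟨h1, h2, h3, h4, ⟨hg1, hg2, ha, hv1, hv2⟩, h6⟩ := h
  obtain ⟨nv, ni⟩ := n
  by_cases hc : adj.contains (nv, ni) = true
  · -- already present: both touches are no-ops
    have hmem := (h4 nv ni).mp hc
    rw [show pvTouchB (adj, views) (nv, ni) = (adj, views) from by simp [pvTouchB, hc]]
    rw [show ((nv, ni) : Int × Int).1 = nv from rfl, show ((nv, ni) : Int × Int).2 = ni from rfl]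
    rw [pvTouchA_of_mem hmem.1 hmem.2 hg1 (hg2 nv)]
    exact ⟨h1, h2, h3, h4, ⟨hg1, hg2, ha, hv1, hv2⟩, h6⟩
  · have hc' : adj.contains (nv, ni) = false := by simpa using hc
    have hnot : ¬ (nv ∈ g.keys ∧ ni ∈ (g.getD nv PySem.Dict.empty).keys) :=
      fun hmem => hc ((h4 nv ni).mpr hmem)
    have hni2 : ni ∉ (g.getD nv PySem.Dict.empty).keys := by
      intro hmem
      apply hnot
      refine ⟨?_, hmem⟩
      rcases hgc : g.contains nv with _ | _
      · rw [PySem.Dict.getD_of_not_contains g PySem.Dict.empty hgc] at hmem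
        simp [PySem.Dict.keys, PySem.Dict.empty] at hmem
      · exact (PySem.Dict.contains_iff_mem_keys _ _).mp hgc
    rw [show pvTouchB (adj, views) (nv, ni) = (adj.insert (nv, ni) PySem.Dict.empty,
        views.insert nv ((views.getD nv PySem.Dict.empty).insert ni true)) from by
      simp [pvTouchB, hc']; rfl]
    rw [show ((nv, ni) : Int × Int).1 = nv from rfl, show ((nv, ni) : Int × Int).2 = ni from rfl]
    rw [pvTouchA_of_not_mem hni2]
    have hkeq : g.contains nv = views.contains nv := pvContains_congr _ _ h1 nv
    constructor
    · -- outer keys equal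
      rcases hgc : g.contains nv with _ | _
      · rw [PySem.Dict.keys_insert_of_not_contains _ _ hgc,
          PySem.Dict.keys_insert_of_not_contains _ _ (by rw [← hkeq]; exact hgc), h1]
      · rw [PySem.Dict.keys_insert_of_contains _ _ hgc,
          PySem.Dict.keys_insert_of_contains _ _ (by rw [← hkeq]; exact hgc)]
        exact h1
    refine ⟨?_, ?_, ?_, ⟨?_, ?_, ?_, ?_, ?_⟩, ?_⟩
    · -- inner keys equal
      intro v
      by_cases hvv : v = nv
      · subst hvv
        rw [PySem.Dict.getD_insert, PySem.Dict.getD_insert, if_pos rfl, if_pos rfl]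
        have hkk : (g.getD v PySem.Dict.empty).keys = (views.getD v PySem.Dict.empty).keys := h2 v
        rcases hic : (g.getD v PySem.Dict.empty).contains ni with _ | _
        · rw [PySem.Dict.keys_insert_of_not_contains _ _ hic,
            PySem.Dict.keys_insert_of_not_contains _ _ (by
              rw [← pvContains_congr _ _ hkk]; exact hic), hkk]
        · exact absurd ((PySem.Dict.contains_iff_mem_keys _ _).mp hic) hni2
      · rw [PySem.Dict.getD_insert, PySem.Dict.getD_insert, if_neg hvv, if_neg hvv]
        exact h2 v
    · -- nbh lift
      intro v i
      unfold pvNbhA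
      rw [PySem.Dict.getD_insert]
      by_cases hvv : v = nv
      · subst hvv
        rw [if_pos rfl, PySem.Dict.getD_insert]
        by_cases hii : i = ni
        · subst hii
          rw [if_pos rfl, PySem.Dict.getD_insert, if_pos rfl]
          rfl
        · rw [if_neg hii, PySem.Dict.getD_insert, if_neg (by
            simp [Prod.ext_iff]; intro h; exact absurd h hii), ← h3 v i]
          rfl
      · rw [if_neg hvv, PySem.Dict.getD_insert, if_neg (by
          simp [Prod.ext_iff]; intro h; exact absurd h hvv), ← h3 v i]
        rfl
    · -- contains characterisation
      intro v i
      rw [PySem.Dict.contains_insert, PySem.Dict.getD_insert]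
      by_cases hvv : v = nv
      · subst hvv
        rw [if_pos rfl]
        by_cases hii : i = ni
        · subst hii
          have hbeq : (((v, i) : Int × Int) == (v, i)) = true := beq_self_eq_true _
          rw [hbeq]
          simp only [Bool.true_or, true_iff]
          constructor
          · rcases hgc : g.contains v with _ | _
            · rw [PySem.Dict.keys_insert_of_not_contains _ _ hgc]; simp
            · rw [PySem.Dict.keys_insert_of_contains _ _ hgc]
              exact (PySem.Dict.contains_iff_mem_keys _ _).mp hgc
          · rcases hic : (g.getD v PySem.Dict.empty).contains i with _ | _
            · rw [PySem.Dict.keys_insert_of_not_contains _ _ hic]; simp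
            · exact absurd ((PySem.Dict.contains_iff_mem_keys _ _).mp hic) hni2
        · have hbeq : (((v, i) : Int × Int) == (v, ni)) = false := by
            simp [Prod.ext_iff, hii]
          rw [hbeq, Bool.false_or, h4 v i]
          constructor
          · rintro ⟨hva, hia⟩
            refine ⟨?_, ?_⟩
            · rcases hgc : g.contains v with _ | _
              · rw [PySem.Dict.keys_insert_of_not_contains _ _ hgc]; simp [hva]
              · rw [PySem.Dict.keys_insert_of_contains _ _ hgc]; exact hva
            · rcases hic : (g.getD v PySem.Dict.empty).contains ni with _ | _
              · rw [PySem.Dict.keys_insert_of_not_contains _ _ hic]; simp; left; exact hia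
              · rw [PySem.Dict.keys_insert_of_contains _ _ hic]; exact hia
          · rintro ⟨hva, hia⟩
            have hva' : v ∈ g.keys := by
              rcases hgc : g.contains v with _ | _
              · exfalso
                rw [PySem.Dict.getD_of_not_contains g PySem.Dict.empty hgc] at hia
                rcases hic : (PySem.Dict.empty (κ := Int) (ν := PySem.Dict Int (PySem.Set Int))).contains ni with _ | _
                · rw [PySem.Dict.keys_insert_of_not_contains _ _ hic] at hia
                  simp [PySem.Dict.keys, PySem.Dict.empty] at hia
                  exact hii hia
                · simp [PySem.Dict.contains, PySem.Dict.empty] at hic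
              · rw [PySem.Dict.keys_insert_of_contains _ _ hgc] at hva; exact hva
            refine ⟨hva', ?_⟩
            rcases hic : (g.getD v PySem.Dict.empty).contains ni with _ | _
            · rw [PySem.Dict.keys_insert_of_not_contains _ _ hic] at hia
              simp at hia
              rcases hia with hia | hia
              · exact hia
              · exact absurd hia hii
            · rw [PySem.Dict.keys_insert_of_contains _ _ hic] at hia; exact hia
      · have hbeq : (((v, i) : Int × Int) == (nv, ni)) = false := by
          simp [Prod.ext_iff, hvv]
        rw [hbeq, Bool.false_or, h4 v i, if_neg hvv]
        have hkeys : v ∈ (g.insert nv ((g.getD nv PySem.Dict.empty).insert ni PySem.Dict.empty)).keys ↔ v ∈ g.keys := by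
          rcases hgc : g.contains nv with _ | _
          · rw [PySem.Dict.keys_insert_of_not_contains _ _ hgc]
            simp [hvv]
          · rw [PySem.Dict.keys_insert_of_contains _ _ hgc]
        rw [hkeys]
    · -- g keys nodup
      rcases hgc : g.contains nv with _ | _
      · rw [PySem.Dict.keys_insert_of_not_contains _ _ hgc]
        have hnv : nv ∉ g.keys := fun hmem => by
          rw [(PySem.Dict.contains_iff_mem_keys g nv).mpr hmem] at hgc
          cases hgc
        simp [List.nodup_append, hg1]
        exact fun a ha e => hnv (e ▸ ha)
      · rw [PySem.Dict.keys_insert_of_contains _ _ hgc]; exact hg1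
    · -- inner keys nodup
      intro v
      rw [PySem.Dict.getD_insert]
      by_cases hvv : v = nv
      · subst hvv
        rw [if_pos rfl]
        exact PySem.Dict.nodup_keys_insert _ _ _ (hg2 v)
      · rw [if_neg hvv]; exact hg2 v
    · -- adj keys nodup
      exact PySem.Dict.nodup_keys_insert _ _ _ ha
    · -- views keys nodup
      exact PySem.Dict.nodup_keys_insert _ _ _ hv1
    · -- views inner keys nodup
      intro v
      rw [PySem.Dict.getD_insert]
      by_cases hvv : v = nv
      · subst hvv
        rw [if_pos rfl]
        exact PySem.Dict.nodup_keys_insert _ _ _ (hv2 v)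
      · rw [if_neg hvv]; exact hv2 v
    · -- closure
      intro m p hp
      rw [PySem.Dict.contains_insert]
      rw [PySem.Dict.getD_insert] at hp
      by_cases hm : m = (nv, ni)
      · rw [if_pos hm] at hp
        simp [PySem.Dict.empty] at hp
      · rw [if_neg hm] at hp
        rw [h6 m p hp]
        simp

theorem pvAdd_inv {g adj views} (h : pvInv g adj views) (a b : Int × Int)
    (ha : adj.contains a = true) (hb : adj.contains b = true)
    (hguard : (adj.getD a PySem.Dict.empty).get? b.1 = none ∨
              (adj.getD a PySem.Dict.empty).get? b.1 = some b.2) :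
    pvInv (pvAddA g a.1 a.2 b.1 b.2) (adj.modify a PySem.Dict.empty (fun d => d.insert b.1 b.2)) views := by
  obtain ⟨h1, h2, h3, h4, ⟨hg1, hg2, hadn, hv1, hv2⟩, h6⟩ := h
  obtain ⟨av, ai⟩ := a
  obtain ⟨bw, bj⟩ := b
  have hmema := (h4 av ai).mp ha
  have hdv : pvNbhA g av ai = pvLift (adj.getD (av, ai) PySem.Dict.empty) := h3 av ai
  -- the new neighbour value on A's side is the singleton {bj}
  have hval : PySem.Set.add ((pvNbhA g av ai).getD bw PySem.Set.empty) bj = [bj] := by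
    rw [hdv, PySem.Dict.getD_eq_get?_getD, pvLift_get?]
    rcases hguard with hg | hg
    · rw [hg]; rfl
    · rw [hg]
      show PySem.Set.add [bj] bj = [bj]
      exact PySem.Set.add_of_mem (by simp)
  have hAeq : pvAddA g av ai bw bj =
      g.insert av ((g.getD av PySem.Dict.empty).insert ai
        (pvLift ((adj.getD (av, ai) PySem.Dict.empty).insert bw bj))) := by
    show g.insert av ((g.getD av PySem.Dict.empty).insert ai
      ((pvNbhA g av ai).insert bw (PySem.Set.add ((pvNbhA g av ai).getD bw PySem.Set.empty) bj))) = _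
    rw [hval, hdv, pvLift_insert]
  have hBeq : adj.modify (av, ai) PySem.Dict.empty (fun d => d.insert bw bj) =
      adj.insert (av, ai) ((adj.getD (av, ai) PySem.Dict.empty).insert bw bj) := rfl
  rw [hAeq, hBeq]
  set da' := (adj.getD (av, ai) PySem.Dict.empty).insert bw bj with hda'
  have hcontai : (g.getD av PySem.Dict.empty).contains ai = true :=
    (PySem.Dict.contains_iff_mem_keys _ _).mpr hmema.2
  have hcontav : g.contains av = true :=
    (PySem.Dict.contains_iff_mem_keys _ _).mpr hmema.1
  have hgkeys : (g.insert av ((g.getD av PySem.Dict.empty).insert ai (pvLift da'))).keys = g.keys :=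
    PySem.Dict.keys_insert_of_contains _ _ hcontav
  have hinkeys : ((g.getD av PySem.Dict.empty).insert ai (pvLift da')).keys = (g.getD av PySem.Dict.empty).keys :=
    PySem.Dict.keys_insert_of_contains _ _ hcontai
  have hadjkeys : (adj.insert (av, ai) da').keys = adj.keys :=
    PySem.Dict.keys_insert_of_contains _ _ ha
  have hcont : ∀ m : Int × Int, (adj.insert (av, ai) da').contains m = adj.contains m :=
    fun m => pvContains_congr _ _ hadjkeys m
  have hginner : ∀ v, (g.insert av ((g.getD av PySem.Dict.empty).insert ai (pvLift da'))).getD v PySem.Dict.empty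
      = if v = av then (g.getD av PySem.Dict.empty).insert ai (pvLift da') else g.getD v PySem.Dict.empty := by
    intro v; rw [PySem.Dict.getD_insert]
  refine ⟨?_, ?_, ?_, ?_, ⟨?_, ?_, ?_, hv1, hv2⟩, ?_⟩
  · rw [hgkeys]; exact h1
  · intro v
    rw [hginner]
    by_cases hvv : v = av
    · subst hvv
      rw [if_pos rfl, hinkeys]
      exact h2 v
    · rw [if_neg hvv]; exact h2 v
  · intro v i
    unfold pvNbhA
    rw [hginner, PySem.Dict.getD_insert]
    by_cases hvv : v = av
    · subst hvv
      rw [if_pos rfl, PySem.Dict.getD_insert]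
      by_cases hii : i = ai
      · subst hii
        rw [if_pos rfl, if_pos rfl]
      · rw [if_neg hii, if_neg (show ¬((v, i) = (v, ai)) from fun h => hii (congrArg Prod.snd h))]
        exact h3 v i
    · rw [if_neg hvv, if_neg (show ¬((v, i) = (av, ai)) from fun h => hvv (congrArg Prod.fst h))]
      exact h3 v i
  · intro v i
    rw [hcont, h4 v i, hgkeys, hginner]
    by_cases hvv : v = av
    · subst hvv
      rw [if_pos rfl, hinkeys]
    · rw [if_neg hvv]
  · rw [hgkeys]; exact hg1
  · intro v
    rw [hginner]
    by_cases hvv : v = av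
    · subst hvv
      rw [if_pos rfl]
      exact PySem.Dict.nodup_keys_insert (g.getD v PySem.Dict.empty) ai (pvLift da') (hg2 v)
    · rw [if_neg hvv]; exact hg2 v
  · exact PySem.Dict.nodup_keys_insert adj (av, ai) da' hadn
  · intro m p hp
    rw [hcont]
    rw [PySem.Dict.getD_insert] at hp
    by_cases hm : m = (av, ai)
    · rw [if_pos hm] at hp
      -- items of da' = items of (adj.getD a).insert bw bj
      rw [hda', PySem.Dict.insert] at hp
      by_cases hw : (adj.getD (av, ai) PySem.Dict.empty).contains bw = true
      · rw [if_pos hw] at hp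
        rcases List.mem_map.mp hp with ⟨q, hq, hqe⟩
        by_cases hqw : (q.1 == bw) = true
        · rw [if_pos hqw] at hqe
          rw [← hqe]
          exact hb
        · rw [if_neg (by simpa using hqw)] at hqe
          rw [← hqe]
          exact h6 (av, ai) q hq
      · rw [if_neg hw] at hp
        rcases List.mem_append.mp hp with hp | hp
        · exact h6 (av, ai) p hp
        · simp at hp
          rw [hp]
          exact hb
    · rw [if_neg hm] at hp
      exact h6 m p hp

theorem pvTouchB_contains_self (st : pvAdjB × pvViewsB) (n : Int × Int) :
    (pvTouchB st n).1.contains n = true := by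
  unfold pvTouchB
  by_cases hc : st.1.contains n = true
  · rw [if_pos hc]; exact hc
  · rw [if_neg hc]
    simp

theorem pvTouchB_contains_mono (st : pvAdjB × pvViewsB) (n m : Int × Int)
    (h : st.1.contains m = true) : (pvTouchB st n).1.contains m = true := by
  unfold pvTouchB
  by_cases hc : st.1.contains n = true
  · rw [if_pos hc]; exact h
  · rw [if_neg hc]
    simp [PySem.Dict.contains_insert, h]

theorem pvTouchB_getD_of_contains (st : pvAdjB × pvViewsB) (n m : Int × Int)
    (h : st.1.contains m = true) :
    (pvTouchB st n).1.getD m PySem.Dict.empty = st.1.getD m PySem.Dict.empty := by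
  unfold pvTouchB
  by_cases hc : st.1.contains n = true
  · rw [if_pos hc]
  · rw [if_neg hc]
    simp only
    rw [PySem.Dict.getD_insert, if_neg (fun he => by rw [he] at h; rw [h] at hc; exact hc rfl)]

theorem pvSetEqual_singleton (x y : Int) :
    PySem.Set.equal ([x] : PySem.Set Int) (PySem.Set.ofList [y]) = (x == y) := by
  rw [show PySem.Set.ofList [y] = [y] from rfl]
  by_cases hxy : x = y
  · subst hxy
    rw [beq_self_eq_true]
    exact (PySem.Set.equal_iff _ _).mpr (fun z => Iff.rfl)
  · rcases he : PySem.Set.equal ([x] : PySem.Set Int) [y] with _ | _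
    · simp [hxy]
    · exfalso
      have := (PySem.Set.equal_iff _ _).mp he x
      simp at this
      exact hxy this

-- the two conflict tests compute the same Boolean
theorem pvCond_eq {g adj views} (h : pvInv g adj views) (a b : Int × Int) :
    ((pvNbhA g a.1 a.2).contains b.1 &&
      !(PySem.Set.equal ((pvNbhA g a.1 a.2).getD b.1 PySem.Set.empty) (PySem.Set.ofList [b.2]))) =
    ((adj.getD a PySem.Dict.empty).contains b.1 &&
      !((adj.getD a PySem.Dict.empty).getD b.1 0 == b.2)) := by
  obtain ⟨h1, h2, h3, h4, hnd, h6⟩ := h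
  rw [show pvNbhA g a.1 a.2 = pvLift (adj.getD (a.1, a.2) PySem.Dict.empty) from h3 a.1 a.2,
    Prod.mk.eta, pvLift_contains]
  rcases hq : (adj.getD a PySem.Dict.empty).get? b.1 with _ | j
  · have hcf : (adj.getD a PySem.Dict.empty).contains b.1 = false := by
      rw [PySem.Dict.contains_eq_isSome_get?, hq]; rfl
    rw [hcf]
    simp
  · have hgd : (adj.getD a PySem.Dict.empty).getD b.1 0 = j := by
      rw [PySem.Dict.getD_eq_get?_getD ((adj.getD a PySem.Dict.empty)) b.1 0, hq]
      rfl
    have hgd2 : (pvLift (adj.getD a PySem.Dict.empty)).getD b.1 PySem.Set.empty = [j] := by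
      rw [PySem.Dict.getD_eq_get?_getD (pvLift (adj.getD a PySem.Dict.empty)) b.1 PySem.Set.empty,
        pvLift_get?, hq]
      rfl
    rw [hgd, hgd2, pvSetEqual_singleton]

theorem pvStep_inv {g adj views} (h : pvInv g adj views) (a b : Int × Int) :
    pvInv (pvStepA g a b) (pvStepB (adj, views) a b).1 (pvStepB (adj, views) a b).2 := by
  have hT1 := pvTouch_inv h a
  simp only [pvStepA, pvStepB]
  rw [pvCond_eq hT1 a b]
  rcases hcb1 : ((pvTouchB (adj, views) a).1.getD a PySem.Dict.empty).contains b.1 &&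
      !((pvTouchB (adj, views) a).1.getD a PySem.Dict.empty).getD b.1 0 == b.2 with _ | _
  · -- no conflict on a's side: evaluate the second test
    rw [if_neg Bool.false_ne_true, if_neg Bool.false_ne_true]
    have hT2 := pvTouch_inv hT1 b
    rw [pvCond_eq hT2 b a]
    rcases hcb2 : ((pvTouchB (pvTouchB (adj, views) a) b).1.getD b PySem.Dict.empty).contains a.1 &&
        !((pvTouchB (pvTouchB (adj, views) a) b).1.getD b PySem.Dict.empty).getD a.1 0 == a.2 with _ | _
    · -- both fine: the two symmetric insertions
      rw [if_neg Bool.false_ne_true, if_neg Bool.false_ne_true]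
      have ha1 : (pvTouchB (adj, views) a).1.contains a = true := pvTouchB_contains_self _ a
      have ha2 : (pvTouchB (pvTouchB (adj, views) a) b).1.contains a = true :=
        pvTouchB_contains_mono _ b a ha1
      have hb2 : (pvTouchB (pvTouchB (adj, views) a) b).1.contains b = true :=
        pvTouchB_contains_self _ b
      have hge : (pvTouchB (pvTouchB (adj, views) a) b).1.getD a PySem.Dict.empty =
          (pvTouchB (adj, views) a).1.getD a PySem.Dict.empty :=
        pvTouchB_getD_of_contains _ b a ha1
      have hguard1 : ((pvTouchB (pvTouchB (adj, views) a) b).1.getD a PySem.Dict.empty).get? b.1 = none ∨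
          ((pvTouchB (pvTouchB (adj, views) a) b).1.getD a PySem.Dict.empty).get? b.1 = some b.2 := by
        rcases hq : ((pvTouchB (adj, views) a).1.getD a PySem.Dict.empty).get? b.1 with _ | j
        · left; rw [hge, hq]
        · right
          have hct : ((pvTouchB (adj, views) a).1.getD a PySem.Dict.empty).contains b.1 = true := by
            rw [PySem.Dict.contains_eq_isSome_get?, hq]; rfl
          have hgd : ((pvTouchB (adj, views) a).1.getD a PySem.Dict.empty).getD b.1 0 = j := by
            rw [PySem.Dict.getD_eq_get?_getD ((pvTouchB (adj, views) a).1.getD a PySem.Dict.empty) b.1 0, hq]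
            rfl
          rw [hct, Bool.true_and, hgd] at hcb1
          have hj : j = b.2 := by
            rcases hjq : (j == b.2) with _ | _
            · rw [hjq] at hcb1; cases hcb1
            · exact eq_of_beq hjq
          rw [hge, hq, hj]
      have hfirst := pvAdd_inv hT2 a b ha2 hb2 hguard1
      -- second insertion, on the state after the first
      have hBmod : (pvTouchB (pvTouchB (adj, views) a) b).1.modify a PySem.Dict.empty
          (fun d => d.insert b.1 b.2) =
          (pvTouchB (pvTouchB (adj, views) a) b).1.insert a
            (((pvTouchB (pvTouchB (adj, views) a) b).1.getD a PySem.Dict.empty).insert b.1 b.2) := rfl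
      have hkeys3 : ((pvTouchB (pvTouchB (adj, views) a) b).1.modify a PySem.Dict.empty
          (fun d => d.insert b.1 b.2)).keys = (pvTouchB (pvTouchB (adj, views) a) b).1.keys := by
        rw [hBmod]
        exact PySem.Dict.keys_insert_of_contains _ _ ha2
      have hcont3 : ∀ m : Int × Int, ((pvTouchB (pvTouchB (adj, views) a) b).1.modify a PySem.Dict.empty
          (fun d => d.insert b.1 b.2)).contains m = (pvTouchB (pvTouchB (adj, views) a) b).1.contains m :=
        fun m => pvContains_congr _ _ hkeys3 m
      have hguard2 : (((pvTouchB (pvTouchB (adj, views) a) b).1.modify a PySem.Dict.empty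
            (fun d => d.insert b.1 b.2)).getD b PySem.Dict.empty).get? a.1 = none ∨
          (((pvTouchB (pvTouchB (adj, views) a) b).1.modify a PySem.Dict.empty
            (fun d => d.insert b.1 b.2)).getD b PySem.Dict.empty).get? a.1 = some a.2 := by
        by_cases hab : b = a
        · right
          rw [hBmod, PySem.Dict.getD_insert, if_pos hab, hab]
          exact PySem.Dict.get?_insert_self _ _ _
        · have hge2 : ((pvTouchB (pvTouchB (adj, views) a) b).1.modify a PySem.Dict.empty
              (fun d => d.insert b.1 b.2)).getD b PySem.Dict.empty =
              (pvTouchB (pvTouchB (adj, views) a) b).1.getD b PySem.Dict.empty := by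
            rw [hBmod, PySem.Dict.getD_insert, if_neg hab]
          rw [hge2]
          rcases hq : ((pvTouchB (pvTouchB (adj, views) a) b).1.getD b PySem.Dict.empty).get? a.1 with _ | j
          · left; rfl
          · right
            have hct : ((pvTouchB (pvTouchB (adj, views) a) b).1.getD b PySem.Dict.empty).contains a.1 = true := by
              rw [PySem.Dict.contains_eq_isSome_get?, hq]; rfl
            have hgd : ((pvTouchB (pvTouchB (adj, views) a) b).1.getD b PySem.Dict.empty).getD a.1 0 = j := by
              rw [PySem.Dict.getD_eq_get?_getD ((pvTouchB (pvTouchB (adj, views) a) b).1.getD b PySem.Dict.empty) a.1 0, hq]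
              rfl
            rw [hct, Bool.true_and, hgd] at hcb2
            have hj : j = a.2 := by
              rcases hjq : (j == a.2) with _ | _
              · rw [hjq] at hcb2; cases hcb2
              · exact eq_of_beq hjq
            rw [hj]
      have hb3 : ((pvTouchB (pvTouchB (adj, views) a) b).1.modify a PySem.Dict.empty
          (fun d => d.insert b.1 b.2)).contains b = true := by rw [hcont3]; exact hb2
      have ha3 : ((pvTouchB (pvTouchB (adj, views) a) b).1.modify a PySem.Dict.empty
          (fun d => d.insert b.1 b.2)).contains a = true := by rw [hcont3]; exact ha2
      exact pvAdd_inv hfirst b a hb3 ha3 hguard2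
    · -- conflict on b's side: state after the two touches
      rw [if_pos rfl, if_pos rfl]
      exact hT2
  · -- conflict on a's side: state after the first touch
    rw [if_pos rfl, if_pos rfl]
    exact hT1

theorem pvInv_empty : pvInv PySem.Dict.empty PySem.Dict.empty PySem.Dict.empty := by
  refine ⟨rfl, fun v => rfl, fun v i => rfl, ?_, ⟨List.nodup_nil, fun v => List.nodup_nil,
    List.nodup_nil, List.nodup_nil, fun v => List.nodup_nil⟩, ?_⟩
  · intro v i
    constructor
    · intro hc; exact absurd hc Bool.false_ne_true
    · rintro ⟨hv, _⟩; exact absurd hv (List.not_mem_nil)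
  · intro n p hp
    exact absurd hp (List.not_mem_nil)

theorem pvBuild_inv (pairs : List ((List (Int × Int)) × (List (Int × Int)))) :
    pvInv (pvBuildA pairs) (pvBuildB pairs).1 (pvBuildB pairs).2 := by
  unfold pvBuildA pvBuildB
  refine pvFoldRel (fun g (st : pvAdjB × pvViewsB) => pvInv g st.1 st.2) _ _ pairs ?_ _ _ pvInv_empty
  intro g st c hR
  exact pvFoldRel (fun g (st : pvAdjB × pvViewsB) => pvInv g st.1 st.2) _ _ (c.1.zip c.2)
    (fun g st ab hR => pvStep_inv hR ab.1 ab.2) g st hR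

-- --- consequences of the invariant ---
def pvFlatA (g : pvGraphA) (n : Int × Int) : List (Int × Int) :=
  (pvNbhA g n.1 n.2).items.flatMap (fun p => p.2.map (fun j => (p.1, j)))

theorem pvNbrs_eq {g adj views} (h : pvInv g adj views) (n : Int × Int) :
    pvFlatA g n = (adj.getD n PySem.Dict.empty).items := by
  obtain ⟨h1, h2, h3, h4, hnd, h6⟩ := h
  unfold pvFlatA
  rw [show pvNbhA g n.1 n.2 = pvLift (adj.getD (n.1, n.2) PySem.Dict.empty) from h3 n.1 n.2,
    Prod.mk.eta]
  exact pvLift_flat _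

theorem pvNodes_eq {g adj views} (h : pvInv g adj views) : pvNodesA g = pvNodesB views := by
  obtain ⟨h1, h2, h3, h4, ⟨hg1, hg2, ha, hv1, hv2⟩, h6⟩ := h
  unfold pvNodesA pvNodesB
  rw [PySem.Dict.items_eq_map_keys g hg1 PySem.Dict.empty,
    PySem.Dict.items_eq_map_keys views hv1 PySem.Dict.empty,
    List.flatMap_map, List.flatMap_map, h1]
  apply List.flatMap_congr
  intro v _
  show (g.getD v PySem.Dict.empty).keys.map (fun i => (v, i))
    = (views.getD v PySem.Dict.empty).keys.map (fun i => (v, i))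
  rw [h2 v]

theorem pvMem_nodesB (views : pvViewsB) (hk : views.keys.Nodup) (v i : Int) :
    (v, i) ∈ pvNodesB views ↔ v ∈ views.keys ∧ i ∈ (views.getD v PySem.Dict.empty).keys := by
  unfold pvNodesB
  rw [PySem.Dict.items_eq_map_keys views hk PySem.Dict.empty, List.flatMap_map]
  simp only [List.mem_flatMap, List.mem_map, Prod.mk.injEq]
  constructor
  · rintro ⟨v', hv', i', hi', he1, he2⟩
    subst he1; subst he2
    exact ⟨hv', hi'⟩
  · rintro ⟨hv, hi⟩
    exact ⟨v, hv, i, hi, rfl, rfl⟩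

theorem pvGroupedNodup (ks : List Int) (f : Int → List Int) (hk : ks.Nodup)
    (hf : ∀ v, (f v).Nodup) :
    (ks.flatMap (fun v => (f v).map (fun i => ((v, i) : Int × Int)))).Nodup := by
  induction ks with
  | nil => exact List.nodup_nil
  | cons v ks' ih =>
    rw [List.flatMap_cons]
    apply List.Nodup.append
    · exact (hf v).map (fun i i' he => ((Prod.mk.injEq _ _ _ _).mp he).2)
    · exact ih (by exact (List.nodup_cons.mp hk).2)
    · intro x hx hx'
      rcases List.mem_map.mp hx with ⟨i, _, rfl⟩
      rcases List.mem_flatMap.mp hx' with ⟨v', hv', hmem⟩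
      rcases List.mem_map.mp hmem with ⟨i', _, he⟩
      have : v' = v := (Prod.mk.injEq _ _ _ _).mp he.symm |>.1.symm
      subst this
      exact (List.nodup_cons.mp hk).1 hv'

theorem pvNodesB_nodup {g adj views} (h : pvInv g adj views) : (pvNodesB views).Nodup := by
  obtain ⟨h1, h2, h3, h4, ⟨hg1, hg2, ha, hv1, hv2⟩, h6⟩ := h
  unfold pvNodesB
  rw [PySem.Dict.items_eq_map_keys views hv1 PySem.Dict.empty, List.flatMap_map]
  exact pvGroupedNodup views.keys (fun v => (views.getD v PySem.Dict.empty).keys) hv1 hv2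

theorem pvClosure {g adj views} (h : pvInv g adj views) :
    ∀ n : Int × Int, ∀ m ∈ (adj.getD n PySem.Dict.empty).items, m ∈ pvNodesB views := by
  intro n m hm
  obtain ⟨h1, h2, h3, h4, ⟨hg1, hg2, ha, hv1, hv2⟩, h6⟩ := h
  have hc := h6 n m hm
  have hmem := (h4 m.1 m.2).mp hc
  rw [← Prod.mk.eta (p := m)]
  rw [pvMem_nodesB views hv1 m.1 m.2]
  exact ⟨h1 ▸ hmem.1, h2 m.1 ▸ hmem.2⟩

-- --- reference worklist traversal (proof-side only) ---
def pvMu (univ : List (Int × Int)) (vis : PySem.Set (Int × Int)) : Nat :=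
  (univ.filter (fun x => decide (x ∉ vis))).length

theorem pvMu_add_lt (univ : List (Int × Int)) (vis : PySem.Set (Int × Int)) (n : Int × Int)
    (hn : n ∈ univ) (hv : n ∉ vis) : pvMu univ (PySem.Set.add vis n) < pvMu univ vis := by
  have hsub : (univ.filter (fun x => decide (x ∉ PySem.Set.add vis n))).Sublist
      (univ.filter (fun x => decide (x ∉ vis))) := by
    apply List.monotone_filter_right
    intro x hx
    simp only [decide_eq_true_eq, PySem.Set.mem_add] at *
    tauto
  rcases Nat.lt_or_ge (univ.filter (fun x => decide (x ∉ PySem.Set.add vis n))).length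
      (univ.filter (fun x => decide (x ∉ vis))).length with h | h
  · exact h
  · exfalso
    have heq := hsub.eq_of_length_le h
    have hmem : n ∈ univ.filter (fun x => decide (x ∉ vis)) := by simp [hn, hv]
    rw [← heq] at hmem
    simp [PySem.Set.mem_add] at hmem

def pvRef (univ : List (Int × Int)) (nbrs : (Int × Int) → List (Int × Int)) :
    List (Int × Int) → PySem.Set (Int × Int) → List (Int × Int) →
    PySem.Set (Int × Int) × List (Int × Int)
  | [], vis, comp => (vis, comp)
  | n :: rest, vis, comp =>
    if n ∈ vis then pvRef univ nbrs rest vis comp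
    else if n ∈ univ then
      pvRef univ nbrs (nbrs n ++ rest) (PySem.Set.add vis n) (comp ++ [n])
    else pvRef univ nbrs rest vis comp
termination_by stack vis _ => (pvMu univ vis, stack.length)
decreasing_by
  · exact Prod.Lex.right _ (Nat.lt_succ_self _)
  · exact Prod.Lex.left _ _ (pvMu_add_lt _ _ _ (by assumption) (by assumption))
  · exact Prod.Lex.right _ (Nat.lt_succ_self _)

theorem pvRef_nil (univ nbrs vis comp) : pvRef univ nbrs [] vis comp = (vis, comp) := by
  rw [pvRef.eq_def]

theorem pvRef_cons (univ nbrs) (n : Int × Int) (rest vis comp) :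
    pvRef univ nbrs (n :: rest) vis comp =
      if n ∈ vis then pvRef univ nbrs rest vis comp
      else if n ∈ univ then
        pvRef univ nbrs (nbrs n ++ rest) (PySem.Set.add vis n) (comp ++ [n])
      else pvRef univ nbrs rest vis comp := by
  rw [pvRef.eq_def]

theorem pvRef_append (univ nbrs) (xs : List (Int × Int)) :
    ∀ ys vis comp, pvRef univ nbrs (xs ++ ys) vis comp =
      pvRef univ nbrs ys (pvRef univ nbrs xs vis comp).1 (pvRef univ nbrs xs vis comp).2 := by
  intro ys vis comp
  fun_induction pvRef univ nbrs xs vis comp with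
  | case1 vis comp =>
    rw [List.nil_append]
  | case2 n rest vis comp hv ih =>
    rw [List.cons_append, pvRef_cons, if_pos hv, ih]
  | case3 n rest vis comp hv hu ih =>
    rw [List.cons_append, pvRef_cons, if_neg hv, if_pos hu, ← List.append_assoc, ih]
  | case4 n rest vis comp hv hu ih =>
    rw [List.cons_append, pvRef_cons, if_neg hv, if_neg hu, ih]

theorem pvRef_vis_mono (univ nbrs) (stack : List (Int × Int)) (vis comp) :
    ∀ x ∈ vis, x ∈ (pvRef univ nbrs stack vis comp).1 := by
  fun_induction pvRef univ nbrs stack vis comp with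
  | case1 vis comp => intro x hx; exact hx
  | case2 n rest vis comp hv ih => exact ih
  | case3 n rest vis comp hv hu ih =>
    intro x hx; exact ih x (by simp [PySem.Set.mem_add]; left; exact hx)
  | case4 n rest vis comp hv hu ih => exact ih

theorem pvRef_comp (univ nbrs) (stack : List (Int × Int)) (vis comp) :
    comp.Nodup → (∀ x ∈ comp, x ∈ vis) →
    (pvRef univ nbrs stack vis comp).2.Nodup ∧
    (∀ x ∈ (pvRef univ nbrs stack vis comp).2, x ∈ (pvRef univ nbrs stack vis comp).1) := by
  fun_induction pvRef univ nbrs stack vis comp with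
  | case1 vis comp => exact fun h1 h2 => ⟨h1, h2⟩
  | case2 n rest vis comp hv ih => exact ih
  | case3 n rest vis comp hv hu ih =>
    intro h1 h2
    have hn : n ∉ comp := fun hc => hv (h2 n hc)
    apply ih
    · simp [List.nodup_append, h1]
      exact fun a b hab e => hn (e ▸ hab)
    · intro x hx
      rcases List.mem_append.mp hx with hx | hx
      · simp [PySem.Set.mem_add]; left; exact h2 x hx
      · simp at hx; simp [hx, PySem.Set.mem_add]
  | case4 n rest vis comp hv hu ih => exact ih

-- --- B's stack loop equals the reference traversal ---
def pvSig (univ : List (Int × Int)) (nbrs : (Int × Int) → List (Int × Int))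
    (vis : PySem.Set (Int × Int)) : Nat :=
  ((univ.filter (fun x => decide (x ∉ vis))).map (fun n => (nbrs n).length + 1)).sum

theorem pvUnvis_perm (univ : List (Int × Int)) (vis : PySem.Set (Int × Int)) (n : Int × Int)
    (hU : univ.Nodup) (hn : n ∈ univ) (hv : n ∉ vis) :
    (univ.filter (fun x => decide (x ∉ vis))).Perm
      (n :: univ.filter (fun x => decide (x ∉ PySem.Set.add vis n))) := by
  have hmem : n ∈ univ.filter (fun x => decide (x ∉ vis)) := by simp [hn, hv]
  have hperm := List.perm_cons_erase hmem
  have hnd : (univ.filter (fun x => decide (x ∉ vis))).Nodup := hU.filter _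
  rw [hnd.erase_eq_filter, List.filter_filter] at hperm
  have hfe : (univ.filter (fun x => decide (x ∉ PySem.Set.add vis n))) =
      univ.filter (fun a => (a != n) && decide (a ∉ vis)) := by
    apply List.filter_congr
    intro x _
    by_cases h1 : x ∈ vis <;> by_cases h2 : x = n <;>
      simp [h1, h2, PySem.Set.mem_add]
  rw [hfe]
  exact hperm

theorem pvSig_step (univ : List (Int × Int)) (nbrs : (Int × Int) → List (Int × Int))
    (vis : PySem.Set (Int × Int)) (n : Int × Int)
    (hU : univ.Nodup) (hn : n ∈ univ) (hv : n ∉ vis) :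
    pvSig univ nbrs vis = (nbrs n).length + 1 + pvSig univ nbrs (PySem.Set.add vis n) := by
  have := ((pvUnvis_perm univ vis n hU hn hv).map (fun m => (nbrs m).length + 1)).sum_eq
  simp only [List.map_cons, List.sum_cons] at this
  simpa [pvSig] using this

theorem pvMu_mono (univ : List (Int × Int)) (vis vis' : PySem.Set (Int × Int))
    (h : ∀ x ∈ vis, x ∈ vis') : pvMu univ vis' ≤ pvMu univ vis := by
  apply List.Sublist.length_le
  apply List.monotone_filter_right
  intro x hx
  simp only [decide_eq_true_eq] at *
  exact fun hm => hx (h x hm)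

theorem pvSig_mono (univ : List (Int × Int)) (nbrs : (Int × Int) → List (Int × Int))
    (vis vis' : PySem.Set (Int × Int)) (h : ∀ x ∈ vis, x ∈ vis') :
    pvSig univ nbrs vis' ≤ pvSig univ nbrs vis := by
  apply List.Sublist.sum_le_sum _ (by simp)
  apply List.Sublist.map
  apply List.monotone_filter_right
  intro x hx
  simp only [decide_eq_true_eq] at *
  exact fun hm => hx (h x hm)

theorem pvMu_le (univ : List (Int × Int)) (vis : PySem.Set (Int × Int)) :
    pvMu univ vis ≤ univ.length :=
  List.length_filter_le _ _

theorem pvLoopB_eq_ref (adj : pvAdjB) (univ : List (Int × Int)) (hU : univ.Nodup)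
    (hC : ∀ n : Int × Int, ∀ m ∈ (adj.getD n PySem.Dict.empty).items, m ∈ univ) :
    ∀ fuel stack vis comp,
      stack.length + pvSig univ (fun n => (adj.getD n PySem.Dict.empty).items) vis < fuel →
      (∀ n ∈ stack, n ∈ univ) →
      pvLoopB adj fuel stack vis comp =
        pvRef univ (fun n => (adj.getD n PySem.Dict.empty).items) stack vis comp := by
  intro fuel
  induction fuel with
  | zero => intro stack vis comp hf hs; omega
  | succ f ih =>
    intro stack vis comp hf hs
    cases stack with
    | nil => rw [pvRef_nil]; rfl
    | cons n rest =>
      by_cases hv : n ∈ vis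
      · rw [show pvLoopB adj (f+1) (n::rest) vis comp =
            if n ∈ vis then pvLoopB adj f rest vis comp
            else pvLoopB adj f ((adj.getD n PySem.Dict.empty).items ++ rest)
              (PySem.Set.add vis n) (comp ++ [n]) from rfl,
          if_pos hv, pvRef_cons, if_pos hv]
        exact ih rest vis comp (by simp at hf ⊢; omega) (fun m hm => hs m (List.mem_cons_of_mem _ hm))
      · have hu : n ∈ univ := hs n (List.mem_cons_self ..)
        rw [show pvLoopB adj (f+1) (n::rest) vis comp =
            if n ∈ vis then pvLoopB adj f rest vis comp
            else pvLoopB adj f ((adj.getD n PySem.Dict.empty).items ++ rest)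
              (PySem.Set.add vis n) (comp ++ [n]) from rfl,
          if_neg hv, pvRef_cons, if_neg hv, if_pos hu]
        apply ih
        · have hσ : pvSig univ (fun n => (adj.getD n PySem.Dict.empty).items) vis =
              (adj.getD n PySem.Dict.empty).items.length + 1 +
              pvSig univ (fun n => (adj.getD n PySem.Dict.empty).items) (PySem.Set.add vis n) :=
            pvSig_step univ (fun n => (adj.getD n PySem.Dict.empty).items) vis n hU hu hv
          simp only [List.length_append, List.length_cons] at hf ⊢
          omega
        · intro m hm
          rcases List.mem_append.mp hm with hm | hm
          · exact hC n m hm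
          · exact hs m (List.mem_cons_of_mem _ hm)

-- --- A's recursive dfs equals the reference traversal ---
theorem pvDfsA_succ (g : pvGraphA) (f : Nat) (n : Int × Int)
    (vis comp : PySem.Set (Int × Int)) :
    pvDfsA g (f+1) n vis comp =
      (pvFlatA g n).foldl
        (fun (st : PySem.Set (Int × Int) × PySem.Set (Int × Int)) m =>
          if m ∈ st.1 then st else pvDfsA g f m st.1 st.2)
        (PySem.Set.add vis n, PySem.Set.add comp n) := by
  rw [pvDfsA]
  simp only [pvFlatA, List.foldl_flatMap, List.foldl_map]

theorem pvDfsA_eq_ref (g : pvGraphA) (univ : List (Int × Int))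
    (hC : ∀ n ∈ univ, ∀ m ∈ pvFlatA g n, m ∈ univ) :
    ∀ f ns vis comp, pvMu univ vis ≤ f → (∀ n ∈ ns, n ∈ univ) → comp.Nodup →
      (∀ x ∈ comp, x ∈ vis) →
      ns.foldl
        (fun (st : PySem.Set (Int × Int) × PySem.Set (Int × Int)) m =>
          if m ∈ st.1 then st else pvDfsA g f m st.1 st.2) (vis, comp) =
      pvRef univ (pvFlatA g) ns vis comp := by
  intro f
  induction f using Nat.strong_induction_on with
  | _ f ihf =>
    intro ns
    induction ns with
    | nil =>
      intro vis comp _ _ _ _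
      rw [List.foldl_nil, pvRef_nil]
    | cons n ns' ih =>
      intro vis comp hmu hns hnd hsub
      rw [List.foldl_cons, pvRef_cons]
      by_cases hv : n ∈ vis
      · rw [if_pos hv]
        simp only [if_pos hv]
        exact ih vis comp hmu (fun m hm => hns m (List.mem_cons_of_mem _ hm)) hnd hsub
      · have hu : n ∈ univ := hns n (List.mem_cons_self ..)
        rw [if_neg hv, if_pos hu]
        have hf1 : 1 ≤ f := by
          have hmem : n ∈ univ.filter (fun x => decide (x ∉ vis)) := by simp [hu, hv]
          have hpos : 0 < pvMu univ vis := List.length_pos_of_mem hmem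
          omega
        obtain ⟨f', rfl⟩ : ∃ f', f = f' + 1 := ⟨f - 1, by omega⟩
        simp only [if_neg hv]
        rw [pvDfsA_succ]
        have hnin : n ∉ comp := fun hc => hv (hsub n hc)
        rw [PySem.Set.add_of_not_mem hnin]
        have hmu' : pvMu univ (PySem.Set.add vis n) ≤ f' := by
          have := pvMu_add_lt univ vis n hu hv
          omega
        have hnd' : (comp ++ [n]).Nodup := by
          simp [List.nodup_append, hnd]
          exact fun a b hab e => hnin (e ▸ hab)
        have hsub' : ∀ x ∈ comp ++ [n], x ∈ PySem.Set.add vis n := by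
          intro x hx
          rcases List.mem_append.mp hx with hx | hx
          · simp [PySem.Set.mem_add]; left; exact hsub x hx
          · simp at hx; simp [hx, PySem.Set.mem_add]
        have hrec := ihf f' (by omega) (pvFlatA g n) (PySem.Set.add vis n) (comp ++ [n])
          hmu' (hC n hu) hnd' hsub'
        rw [hrec, pvRef_append]
        have hcomp := pvRef_comp univ (pvFlatA g) (pvFlatA g n) (PySem.Set.add vis n)
          (comp ++ [n]) hnd' hsub'
        have hvm := pvRef_vis_mono univ (pvFlatA g) (pvFlatA g n) (PySem.Set.add vis n) (comp ++ [n])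
        have hmu'' : pvMu univ (pvRef univ (pvFlatA g) (pvFlatA g n) (PySem.Set.add vis n) (comp ++ [n])).1 ≤ f' + 1 := by
          have h1 : pvMu univ (pvRef univ (pvFlatA g) (pvFlatA g n) (PySem.Set.add vis n) (comp ++ [n])).1 ≤
              pvMu univ (PySem.Set.add vis n) :=
            pvMu_mono univ _ _ (fun x hx => hvm x (by
              simp [PySem.Set.mem_add]
              by_cases hxn : x = n
              · right; exact hxn
              · left; simp [PySem.Set.mem_add] at hx; tauto))
          omega
        have := ih (pvRef univ (pvFlatA g) (pvFlatA g n) (PySem.Set.add vis n) (comp ++ [n])).1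
          (pvRef univ (pvFlatA g) (pvFlatA g n) (PySem.Set.add vis n) (comp ++ [n])).2
          hmu'' (fun m hm => hns m (List.mem_cons_of_mem _ hm)) hcomp.1 hcomp.2
        simpa using this

-- --- outer loops ---
theorem pvA_outer (g : pvGraphA) (univ : List (Int × Int))
    (hC : ∀ n ∈ univ, ∀ m ∈ pvFlatA g n, m ∈ univ) (F : Nat) (hF : univ.length ≤ F) :
    ∀ (ns : List (Int × Int)) (vis : PySem.Set (Int × Int)) (out : List (List (Int × Int))), (∀ n ∈ ns, n ∈ univ) →
      ns.foldl
        (fun (st : PySem.Set (Int × Int) × List (List (Int × Int))) n =>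
          if n ∈ st.1 then st
          else
            let r := pvDfsA g (F + 1) n st.1 PySem.Set.empty
            (r.1, st.2 ++ [r.2])) (vis, out) =
      ns.foldl
        (fun (st : PySem.Set (Int × Int) × List (List (Int × Int))) n =>
          if n ∈ st.1 then st
          else
            let r := pvRef univ (pvFlatA g) [n] st.1 []
            (r.1, st.2 ++ [r.2])) (vis, out) := by
  intro ns
  induction ns with
  | nil => intro vis out _; rfl
  | cons n ns' ih =>
    intro vis out hns
    simp only [List.foldl_cons]
    by_cases hv : n ∈ vis
    · simp only [if_pos hv]
      exact ih vis out (fun m hm => hns m (List.mem_cons_of_mem _ hm))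
    · have hu : n ∈ univ := hns n (List.mem_cons_self ..)
      have hstep := pvDfsA_eq_ref g univ hC (F + 1) [n] vis []
        (by have := pvMu_le univ vis; omega)
        (by intro m hm; simp at hm; rw [hm]; exact hu)
        List.nodup_nil (by intro x hx; simp at hx)
      simp only [List.foldl_cons, List.foldl_nil, if_neg hv] at hstep
      simp only [if_neg hv]
      show (ns'.foldl _ ((pvDfsA g (F+1) n vis PySem.Set.empty).1,
        out ++ [(pvDfsA g (F+1) n vis PySem.Set.empty).2])) = _
      rw [show (pvDfsA g (F+1) n vis PySem.Set.empty) = pvRef univ (pvFlatA g) [n] vis [] from hstep]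
      exact ih _ _ (fun m hm => hns m (List.mem_cons_of_mem _ hm))

theorem pvB_outer (adj : pvAdjB) (univ : List (Int × Int)) (hU : univ.Nodup)
    (hC : ∀ n : Int × Int, ∀ m ∈ (adj.getD n PySem.Dict.empty).items, m ∈ univ)
    (FB : Nat) (hFB : 1 + pvSig univ (fun n => (adj.getD n PySem.Dict.empty).items) PySem.Set.empty < FB) :
    ∀ (ns : List (Int × Int)) (vis : PySem.Set (Int × Int)) (out : List (List (Int × Int))), (∀ n ∈ ns, n ∈ univ) →
      ns.foldl
        (fun (acc : PySem.Set (Int × Int) × List (List (Int × Int))) n =>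
          if n ∈ acc.1 then acc
          else
            let r := pvLoopB adj FB [n] acc.1 []
            (r.1, acc.2 ++ [PySem.Set.ofList r.2])) (vis, out) =
      ns.foldl
        (fun (st : PySem.Set (Int × Int) × List (List (Int × Int))) n =>
          if n ∈ st.1 then st
          else
            let r := pvRef univ (fun n => (adj.getD n PySem.Dict.empty).items) [n] st.1 []
            (r.1, st.2 ++ [r.2])) (vis, out) := by
  intro ns
  induction ns with
  | nil => intro vis out _; rfl
  | cons n ns' ih =>
    intro vis out hns
    simp only [List.foldl_cons]
    by_cases hv : n ∈ vis
    · simp only [if_pos hv]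
      exact ih vis out (fun m hm => hns m (List.mem_cons_of_mem _ hm))
    · have hu : n ∈ univ := hns n (List.mem_cons_self ..)
      have hb : 1 + pvSig univ (fun n => (adj.getD n PySem.Dict.empty).items) vis < FB := by
        have := pvSig_mono univ (fun n => (adj.getD n PySem.Dict.empty).items)
          PySem.Set.empty vis (by intro x hx; simp [PySem.Set.empty] at hx)
        omega
      have hstep := pvLoopB_eq_ref adj univ hU hC FB [n] vis []
        (by simpa using hb)
        (by intro m hm; simp at hm; rw [hm]; exact hu)
      have hcomp := pvRef_comp univ (fun n => (adj.getD n PySem.Dict.empty).items) [n] vis []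
        List.nodup_nil (by intro x hx; simp at hx)
      simp only [if_neg hv]
      show (ns'.foldl _ ((pvLoopB adj FB [n] vis []).1,
        out ++ [PySem.Set.ofList (pvLoopB adj FB [n] vis []).2])) = _
      have hofl : PySem.Set.ofList (pvLoopB adj FB [n] vis []).2 = (pvLoopB adj FB [n] vis []).2 := by
        rw [hstep]
        exact PySem.Set.ofList_eq_self_of_nodup _ hcomp.1
      rw [hofl, hstep]
      exact ih _ _ (fun m hm => hns m (List.mem_cons_of_mem _ hm))

-- ===== VERDICT (by name: the statement is the Claim_ definition above) =====
theorem pvMain (pairs : List ((List (Int × Int)) × (List (Int × Int)))) :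
    merge_cross_view_associations_with_constraints pairs =
    merge_cross_view_associations_with_constraints_alt pairs := by
  have hInv := pvBuild_inv pairs
  obtain ⟨h1, h2, h3, h4, ⟨hg1, hg2, ha, hv1, hv2⟩, h6⟩ := pvBuild_inv pairs
  have hnodes : pvNodesA (pvBuildA pairs) = pvNodesB (pvBuildB pairs).2 := pvNodes_eq hInv
  have hnbrs : pvFlatA (pvBuildA pairs) =
      (fun n => ((pvBuildB pairs).1.getD n PySem.Dict.empty).items) :=
    funext (pvNbrs_eq hInv)
  have hU : (pvNodesB (pvBuildB pairs).2).Nodup := pvNodesB_nodup hInv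
  have hCB := pvClosure hInv
  have hCA : ∀ n ∈ pvNodesB (pvBuildB pairs).2, ∀ m ∈ pvFlatA (pvBuildA pairs) n,
      m ∈ pvNodesB (pvBuildB pairs).2 := by
    intro n _ m hm
    rw [hnbrs] at hm
    exact hCB n m hm
  -- the fuel computed by B's port is sufficient
  have hperm : (pvNodesB (pvBuildB pairs).2).Perm (pvBuildB pairs).1.keys := by
    rw [List.perm_ext_iff_of_nodup hU ha]
    intro m
    rw [← Prod.mk.eta (p := m), pvMem_nodesB _ hv1 m.1 m.2,
      ← PySem.Dict.contains_iff_mem_keys (pvBuildB pairs).1 (m.1, m.2), h4 m.1 m.2, h1, h2 m.1]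
  have hfilter : (pvNodesB (pvBuildB pairs).2).filter (fun x => decide (x ∉ PySem.Set.empty)) =
      pvNodesB (pvBuildB pairs).2 := by
    apply List.filter_eq_self.mpr
    intro x _
    simp [PySem.Set.empty]
  have hsum : ((pvNodesB (pvBuildB pairs).2).map
        (fun n => (((pvBuildB pairs).1.getD n PySem.Dict.empty).items).length)).sum =
      ((pvBuildB pairs).1.items.map (fun p => p.2.items.length)).sum := by
    rw [(hperm.map (fun n => (((pvBuildB pairs).1.getD n PySem.Dict.empty).items).length)).sum_eq]
    rw [PySem.Dict.items_eq_map_keys (pvBuildB pairs).1 ha PySem.Dict.empty, List.map_map]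
    rfl
  have hFB : 1 + pvSig (pvNodesB (pvBuildB pairs).2)
      (fun n => ((pvBuildB pairs).1.getD n PySem.Dict.empty).items) PySem.Set.empty <
      pvFuelB (pvBuildB pairs).1 (pvNodesB (pvBuildB pairs).2) := by
    unfold pvSig pvFuelB
    rw [hfilter, PySem.List.foldl_add_nat, List.sum_map_add]
    rw [hsum]
    simp only [List.map_const', List.sum_replicate, smul_eq_mul, mul_one]
    omega
  show (((pvNodesA (pvBuildA pairs))).foldl _ (PySem.Set.empty, [])).2 =
    (((pvNodesB (pvBuildB pairs).2)).foldl _ (PySem.Set.empty, [])).2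
  rw [hnodes]
  rw [pvA_outer (pvBuildA pairs) (pvNodesB (pvBuildB pairs).2) hCA
    (pvNodesB (pvBuildB pairs).2).length (le_refl _) (pvNodesB (pvBuildB pairs).2)
    PySem.Set.empty [] (fun n hn => hn)]
  rw [hnbrs]
  rw [pvB_outer (pvBuildB pairs).1 (pvNodesB (pvBuildB pairs).2) hU hCB
    (pvFuelB (pvBuildB pairs).1 (pvNodesB (pvBuildB pairs).2)) hFB (pvNodesB (pvBuildB pairs).2)
    PySem.Set.empty [] (fun n hn => hn)]

theorem merge_cross_view_associations_with_constraints_spec : Claim_equal_merge_cross_view_associations_with_constraints := by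
  intro pairs _ _
  exact pvMain pairs
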